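-- pv_equiv track=rewrite | github.com/burakacar48/Galaktik | modules/models/galactic_pattern_model.py | check_fibonacci_pattern
-- ===== SOURCE A (Python) =====
-- from typing import Tuple, Optional, List
--
-- def check_fibonacci_pattern(recent_history: List[str]) -> bool:
--     """Check if recent results follow a Fibonacci-like pattern in runs"""
--     if len(recent_history) < 8:
--         return False
--
--     # Count consecutive runs of P and B
--     runs = []
--     current_run = 1
--     for i in range(1, len(recent_history)):
--         if recent_history[i] == recent_history[i-1]:
--             current_run += 1
--         else:
--             runs.append(current_run)
--             current_run = 1
--     runs.append(current_run)
--
--     # Check if run lengths match Fibonacci sequence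
--     if len(runs) < 3:
--         return False
--
--     # Check if any 3 consecutive runs form a Fibonacci sequence
--     for i in range(len(runs) - 2):
--         if runs[i] + runs[i+1] == runs[i+2]:
--             return True
--
--     return False
-- ===== SOURCE B (Python) =====
-- from typing import List
--
-- def check_fibonacci_pattern(recent_history: List[str]) -> bool:
--     """Single streaming pass: keep the last two completed run lengths
--     and test prev2+prev1 == new run the moment each run ends."""
--     if len(recent_history) < 8:
--         return False
--     it = iter(recent_history)
--     prev = next(it)
--     prev2 = prev1 = None
--     current_run = 1
--     for x in it:
--         if x == prev:
--             current_run += 1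
--         else:
--             if prev2 is not None and prev2 + prev1 == current_run:
--                 return True
--             prev2, prev1, current_run = prev1, current_run, 1
--         prev = x
--     return prev2 is not None and prev2 + prev1 == current_run
-- ===== Notes on version B (the rewrite author's own statement) =====
-- stated objective: alternative
-- what changed: Replaced A's two-phase approach (build the full runs list, then rescan it for a Fibonacci triple) by a single streaming pass that keeps only the current run length and the last two completed run lengths, returning True the moment a run closes with prev2+prev1 == new.
import Mathlib
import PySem

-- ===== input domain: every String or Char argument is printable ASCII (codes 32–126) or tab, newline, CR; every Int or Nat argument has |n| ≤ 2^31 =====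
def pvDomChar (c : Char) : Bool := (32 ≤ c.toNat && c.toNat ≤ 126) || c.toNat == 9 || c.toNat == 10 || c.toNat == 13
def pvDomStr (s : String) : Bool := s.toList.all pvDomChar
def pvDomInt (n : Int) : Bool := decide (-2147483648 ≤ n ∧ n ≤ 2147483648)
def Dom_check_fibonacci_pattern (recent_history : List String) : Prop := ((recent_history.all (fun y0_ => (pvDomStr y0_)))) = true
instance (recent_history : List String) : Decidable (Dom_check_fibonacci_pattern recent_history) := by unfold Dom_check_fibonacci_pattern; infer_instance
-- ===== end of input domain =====

-- B replaces A's two phases (build the full runs list, then rescan it for a Fibonacci triple)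
-- by one streaming pass that keeps only the last two completed run lengths (objective: alternative/constant-space).

-- ===== PORT A =====
-- A's run-counting loop: walk the list comparing each element to the previous one,
-- emitting the completed run lengths in order, with the final `runs.append(current_run)`.
def pvRunsA (prev : String) (rest : List String) (current_run : Int) : List Int :=
  match rest with
  | [] => [current_run]
  | x :: xs => if x == prev then pvRunsA x xs (current_run + 1)
               else current_run :: pvRunsA x xs 1

-- A's second loop: for i in range(len(runs)-2), test runs[i]+runs[i+1]==runs[i+2].
def pvAnyFib (runs : List Int) : Bool :=
  match runs with
  | a :: b :: c :: rs => if a + b == c then true else pvAnyFib (b :: c :: rs)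
  | _ => false

def check_fibonacci_pattern (recent_history : List String) : Bool :=
  if recent_history.length < 8 then false
  else
    match recent_history with
    | [] => false  -- unreachable (length ≥ 8)
    | r0 :: rest =>
      let runs := pvRunsA r0 rest 1
      if runs.length < 3 then false
      else pvAnyFib runs

-- ===== PORT B =====
-- B's single loop: state = (prev2?, prev1?, current_run); on a run boundary test
-- prev2+prev1 == current_run and return True immediately, else shift; finalize after the loop.
def pvStream (prev : String) (rest : List String) (prev2 prev1 : Option Int)
    (current_run : Int) : Bool :=
  match rest with
  | [] =>
    match prev2, prev1 with
    | some a, some b => a + b == current_run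
    | _, _ => false
  | x :: xs =>
    if x == prev then pvStream x xs prev2 prev1 (current_run + 1)
    else
      match prev2, prev1 with
      | some a, some b =>
        if a + b == current_run then true
        else pvStream x xs prev1 (some current_run) 1
      | _, _ => pvStream x xs prev1 (some current_run) 1

def check_fibonacci_pattern_alt (recent_history : List String) : Bool :=
  if recent_history.length < 8 then false
  else
    match recent_history with
    | [] => false  -- unreachable (length ≥ 8)
    | r0 :: rest => pvStream r0 rest none none 1

-- ===== PRECONDITION & SPEC =====
def Spec_check_fibonacci_pattern (recent_history : List String) (out : Bool) : Prop := out = check_fibonacci_pattern_alt recent_history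
instance (recent_history : List String) (out : Bool) : Decidable (Spec_check_fibonacci_pattern recent_history out) := by unfold Spec_check_fibonacci_pattern; infer_instance

-- ===== CLAIM (what is proved, stated in full; the proofs are below) =====
def Claim_equal_check_fibonacci_pattern : Prop := ∀ (recent_history : List String), Dom_check_fibonacci_pattern recent_history → Spec_check_fibonacci_pattern recent_history (check_fibonacci_pattern recent_history)

-- ===== LEMMAS AND PROOFS =====

-- the streaming scan over an already-built runs list
def pvAnyFibS (prev2 prev1 : Option Int) (runs : List Int) : Bool :=
  match runs with
  | [] => false
  | r :: rs =>
    match prev2, prev1 with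
    | some a, some b => if a + b == r then true else pvAnyFibS prev1 (some r) rs
    | _, _ => pvAnyFibS prev1 (some r) rs

theorem pvStream_eq_anyFibS (rest : List String) :
    ∀ (prev : String) (prev2 prev1 : Option Int) (cur : Int),
      pvStream prev rest prev2 prev1 cur = pvAnyFibS prev2 prev1 (pvRunsA prev rest cur) := by
  induction rest with
  | nil =>
    intro prev prev2 prev1 cur
    cases prev2 <;> cases prev1 <;> simp [pvStream, pvRunsA, pvAnyFibS, Bool.beq_eq_decide_eq]
  | cons x xs ih =>
    intro prev prev2 prev1 cur
    by_cases h : x == prev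
    · simp [pvStream, pvRunsA, h, ih]
    · cases prev2 <;> cases prev1 <;>
        simp [pvStream, pvRunsA, h, ih, pvAnyFibS]

theorem pvAnyFibS_some_some (l : List Int) :
    ∀ (a b : Int), pvAnyFibS (some a) (some b) l = pvAnyFib (a :: b :: l) := by
  induction l with
  | nil => intro a b; simp [pvAnyFibS, pvAnyFib]
  | cons c rs ih =>
    intro a b
    simp only [pvAnyFibS, pvAnyFib]
    split <;> simp [ih]

theorem pvAnyFibS_none_none (runs : List Int) :
    pvAnyFibS none none runs = pvAnyFib runs := by
  match runs with
  | [] => simp [pvAnyFibS, pvAnyFib]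
  | [a] => simp [pvAnyFibS, pvAnyFib]
  | a :: b :: rs => simp [pvAnyFibS, pvAnyFibS_some_some]

theorem pvAnyFib_short (runs : List Int) (h : runs.length < 3) : pvAnyFib runs = false := by
  match runs with
  | [] => rfl
  | [a] => rfl
  | [a, b] => rfl
  | a :: b :: c :: rs => simp at h; omega

-- ===== VERDICT (by name: the statement is the Claim_ definition above) =====
theorem check_fibonacci_pattern_spec : Claim_equal_check_fibonacci_pattern := by
  intro recent_history _
  unfold Spec_check_fibonacci_pattern check_fibonacci_pattern check_fibonacci_pattern_alt
  by_cases hlen : recent_history.length < 8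
  · simp [hlen]
  · simp only [hlen, if_false]
    match recent_history with
    | [] => rfl
    | r0 :: rest =>
      simp only [pvStream_eq_anyFibS, pvAnyFibS_none_none]
      split
      · next h => rw [pvAnyFib_short _ h]
      · rfl
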